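-- pv_equiv track=rewrite | github.com/Loukoulele/Loukoulele | scripts/split_spritesheet.py | _find_bands
-- ===== SOURCE A (Python) =====
-- def _find_bands(has_pixels, min_gap, min_size):
--     """Trouve les bandes continues de pixels avec tolérance pour les petits gaps."""
--     bands = []
--     in_band = False
--     start = 0
--     gap_count = 0
--
--     for i, v in enumerate(has_pixels):
--         if v:
--             if not in_band:
--                 start = i
--                 in_band = True
--             gap_count = 0
--         else:
--             if in_band:
--                 gap_count += 1
--                 if gap_count >= min_gap:
--                     end = i - gap_count + 1
--                     if end - start >= min_size:
--                         bands.append((start, end))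
--                     in_band = False
--                     gap_count = 0
--
--     if in_band:
--         end = len(has_pixels)
--         if end - start >= min_size:
--             bands.append((start, end))
--
--     return bands
-- ===== SOURCE B (Python) =====
-- def _find_bands(has_pixels, min_gap, min_size):
--     """Runs -> gap-merge -> trailing extension -> size filter."""
--     n = len(has_pixels)
--     # 1) maximal runs of truthy values as (start, end) half-open intervals
--     runs = []
--     run_start = -1
--     for i, v in enumerate(has_pixels):
--         if v:
--             if run_start < 0:
--                 run_start = i
--         elif run_start >= 0:
--             runs.append((run_start, i))
--             run_start = -1
--     if run_start >= 0:
--         runs.append((run_start, n))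
--     # 2) merge consecutive runs separated by a gap strictly smaller than min_gap
--     merged = []
--     for s, e in runs:
--         if merged and s - merged[-1][1] < min_gap:
--             merged[-1] = (merged[-1][0], e)
--         else:
--             merged.append((s, e))
--     # 3) an open trailing band reaches the end of the array
--     if merged and n - merged[-1][1] < min_gap:
--         merged[-1] = (merged[-1][0], n)
--     # 4) keep bands of sufficient size
--     return [(s, e) for s, e in merged if e - s >= min_size]
-- ===== Notes on version B (the rewrite author's own statement) =====
-- stated objective: simpler
-- what changed: Replaced A's single four-variable gap-counting automaton by a three-stage pipeline: extract maximal true-runs as intervals, merge consecutive runs whose gap is < min_gap (extending an open trailing band to the array end), then filter by size.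
import Mathlib
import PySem

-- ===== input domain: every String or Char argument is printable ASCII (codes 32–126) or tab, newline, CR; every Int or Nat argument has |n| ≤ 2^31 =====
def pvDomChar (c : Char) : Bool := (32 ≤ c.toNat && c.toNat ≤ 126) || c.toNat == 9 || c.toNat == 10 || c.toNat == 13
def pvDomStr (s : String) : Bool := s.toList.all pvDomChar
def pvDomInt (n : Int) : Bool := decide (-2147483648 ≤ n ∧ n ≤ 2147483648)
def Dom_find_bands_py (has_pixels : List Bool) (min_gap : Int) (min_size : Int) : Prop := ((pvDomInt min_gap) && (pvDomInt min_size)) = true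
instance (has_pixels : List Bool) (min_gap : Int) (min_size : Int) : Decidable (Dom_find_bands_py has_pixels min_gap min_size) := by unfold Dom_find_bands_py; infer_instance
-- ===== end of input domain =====

-- B re-decomposes A's single gap-tolerant automaton into runs → gap-merge → trailing extension → size filter (objective: simpler; same return value, no speed claim).

-- ===== PORT A =====
-- loop body of A: state = (bands, in_band, start, gap_count), element = (i, v)
def pvAStep (min_gap min_size : Int) (st : List (Int × Int) × Bool × Int × Int) (iv : Int × Bool) : List (Int × Int) × Bool × Int × Int :=
  if iv.2 then
    (st.1, true, (if st.2.1 then st.2.2.1 else iv.1), 0)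
  else if st.2.1 then
    (if st.2.2.2 + 1 ≥ min_gap then
      ((if (iv.1 - (st.2.2.2 + 1) + 1) - st.2.2.1 ≥ min_size then st.1 ++ [(st.2.2.1, iv.1 - (st.2.2.2 + 1) + 1)] else st.1), false, st.2.2.1, 0)
    else (st.1, true, st.2.2.1, st.2.2.2 + 1))
  else st

def find_bands_py (has_pixels : List Bool) (min_gap : Int) (min_size : Int) : List (Int × Int) :=
  let st := (PySem.List.enumerate has_pixels 0).foldl (pvAStep min_gap min_size) ([], false, 0, 0)
  if st.2.1 then
    (if (has_pixels.length : Int) - st.2.2.1 ≥ min_size then st.1 ++ [(st.2.2.1, (has_pixels.length : Int))] else st.1)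
  else st.1

-- ===== PORT B =====
-- run-extraction loop body: state = (runs, run_start) with run_start = -1 meaning "no open run"
def pvBRunStep (st : List (Int × Int) × Int) (iv : Int × Bool) : List (Int × Int) × Int :=
  if iv.2 then (st.1, if st.2 < 0 then iv.1 else st.2)
  else if st.2 ≥ 0 then (st.1 ++ [(st.2, iv.1)], -1)
  else st

-- merge loop body; merged list kept reversed, head = python's merged[-1]
def pvBMergeStep (min_gap : Int) (acc : List (Int × Int)) (se : Int × Int) : List (Int × Int) :=
  match acc with
  | [] => [se]
  | (cs, ce) :: rest => if se.1 - ce < min_gap then (cs, se.2) :: rest else se :: (cs, ce) :: rest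

-- "if merged and n - merged[-1][1] < min_gap: merged[-1] = (merged[-1][0], n)" on the reversed list
def pvBExtend (min_gap n : Int) (acc : List (Int × Int)) : List (Int × Int) :=
  match acc with
  | [] => []
  | (cs, ce) :: rest => (cs, if n - ce < min_gap then n else ce) :: rest

def find_bands_py_alt (has_pixels : List Bool) (min_gap : Int) (min_size : Int) : List (Int × Int) :=
  let n : Int := has_pixels.length
  let st := (PySem.List.enumerate has_pixels 0).foldl pvBRunStep ([], -1)
  let runs := if st.2 ≥ 0 then st.1 ++ [(st.2, n)] else st.1
  let merged := (pvBExtend min_gap n (runs.foldl (pvBMergeStep min_gap) [])).reverse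
  merged.filter (fun p => p.2 - p.1 ≥ min_size)

-- ===== PRECONDITION & SPEC =====
def Spec_find_bands_py (has_pixels : List Bool) (min_gap : Int) (min_size : Int) (out : List (Int × Int)) : Prop := out = find_bands_py_alt has_pixels min_gap min_size
instance (has_pixels : List Bool) (min_gap : Int) (min_size : Int) (out : List (Int × Int)) : Decidable (Spec_find_bands_py has_pixels min_gap min_size out) := by unfold Spec_find_bands_py; infer_instance

-- ===== CLAIM (what is proved, stated in full; the proofs are below) =====
def Claim_equal_find_bands_py : Prop := ∀ (has_pixels : List Bool) (min_gap : Int) (min_size : Int), Dom_find_bands_py has_pixels min_gap min_size → Spec_find_bands_py has_pixels min_gap min_size (find_bands_py has_pixels min_gap min_size)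

-- ===== LEMMAS AND PROOFS =====

-- recursive reformulation of A's loop, with unconditional appends (size filter applied afterwards)
def pvARec (mg : Int) : List Bool → Int → Bool → Int → Int → List (Int × Int)
  | [], i, inb, s, _ => if inb then [(s, i)] else []
  | v :: t, i, inb, s, g =>
    if v then pvARec mg t (i + 1) true (if inb then s else i) 0
    else if inb then
      (if g + 1 ≥ mg then (s, i - g) :: pvARec mg t (i + 1) false s 0
       else pvARec mg t (i + 1) true s (g + 1))
    else pvARec mg t (i + 1) false s g

-- recursive reformulation of B's run extraction: o = start of the currently open run (if any)
def pvRunsR : List Bool → Int → Option Int → List (Int × Int)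
  | [], _, none => []
  | [], i, some s => [(s, i)]
  | true :: t, i, none => pvRunsR t (i + 1) (some i)
  | true :: t, i, some s => pvRunsR t (i + 1) (some s)
  | false :: t, i, none => pvRunsR t (i + 1) none
  | false :: t, i, some s => (s, i) :: pvRunsR t (i + 1) none

-- recursive reformulation of B's merge + trailing extension: cur = current merged band
def pvBRec (mg : Int) : List (Int × Int) → Int × Int → Int → List (Int × Int)
  | [], cur, n => [(cur.1, if n - cur.2 < mg then n else cur.2)]
  | r :: t, cur, n => if r.1 - cur.2 < mg then pvBRec mg t (cur.1, r.2) n else cur :: pvBRec mg t r n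

def pvPipe (mg : Int) (rs : List (Int × Int)) (n : Int) : List (Int × Int) :=
  match rs with | [] => [] | r :: t => pvBRec mg t r n

def pvBFirst (mg : Int) (rs : List (Int × Int)) (cs n : Int) : List (Int × Int) :=
  match rs with | [] => [] | r :: t => pvBRec mg t (cs, r.2) n

-- equation lemmas for the recursive reformulations
lemma pvARec_cons_t (mg : Int) (t : List Bool) (i : Int) (inb : Bool) (s g : Int) :
    pvARec mg (true :: t) i inb s g = pvARec mg t (i + 1) true (if inb then s else i) 0 := by
  simp [pvARec]

lemma pvARec_cons_f_closed (mg : Int) (t : List Bool) (i s g : Int) :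
    pvARec mg (false :: t) i false s g = pvARec mg t (i + 1) false s g := by
  simp [pvARec]

lemma pvARec_cons_f_close (mg : Int) (t : List Bool) (i s g : Int) (h : g + 1 ≥ mg) :
    pvARec mg (false :: t) i true s g = (s, i - g) :: pvARec mg t (i + 1) false s 0 := by
  simp [pvARec, h]

lemma pvARec_cons_f_cont (mg : Int) (t : List Bool) (i s g : Int) (h : ¬ (g + 1 ≥ mg)) :
    pvARec mg (false :: t) i true s g = pvARec mg t (i + 1) true s (g + 1) := by
  simp [pvARec, h]

lemma pvBRec_cons (mg : Int) (r : Int × Int) (t : List (Int × Int)) (cur : Int × Int) (n : Int) :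
    pvBRec mg (r :: t) cur n = if r.1 - cur.2 < mg then pvBRec mg t (cur.1, r.2) n else cur :: pvBRec mg t r n := rfl

lemma pvBFirst_cons (mg : Int) (r : Int × Int) (t : List (Int × Int)) (cs n : Int) :
    pvBFirst mg (r :: t) cs n = pvBRec mg t (cs, r.2) n := rfl

lemma pvA_fold (mg ms : Int) : ∀ (l : List Bool) (i : Int) (bands : List (Int × Int)) (inb : Bool) (s g : Int),
    (let st := (PySem.List.enumerate l i).foldl (pvAStep mg ms) (bands, inb, s, g)
     if st.2.1 then
       (if (i + (l.length : Int)) - st.2.2.1 ≥ ms then st.1 ++ [(st.2.2.1, i + (l.length : Int))] else st.1)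
     else st.1)
    = bands ++ (pvARec mg l i inb s g).filter (fun p => p.2 - p.1 ≥ ms) := by
  intro l
  induction l with
  | nil =>
    intro i bands inb s g
    cases inb with
    | false => simp [PySem.List.enumerate_nil, pvARec]
    | true =>
      by_cases h : i - s ≥ ms <;>
        simp [PySem.List.enumerate_nil, pvARec, h]
  | cons v t ih =>
    intro i bands inb s g
    rw [PySem.List.enumerate_cons]
    have hn : i + ((v :: t).length : Int) = (i + 1) + (t.length : Int) := by simp; omega
    simp only [List.foldl_cons, hn]
    cases v with
    | true =>
      have hstep : pvAStep mg ms (bands, inb, s, g) (i, true) = (bands, true, (if inb then s else i), 0) := by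
        simp [pvAStep]
      rw [hstep, pvARec_cons_t]
      exact ih (i + 1) bands true (if inb then s else i) 0
    | false =>
      cases inb with
      | false =>
        have hstep : pvAStep mg ms (bands, false, s, g) (i, false) = (bands, false, s, g) := by
          simp [pvAStep]
        rw [hstep, pvARec_cons_f_closed]
        exact ih (i + 1) bands false s g
      | true =>
        by_cases hg : g + 1 ≥ mg
        · have he : i - (g + 1) + 1 = i - g := by omega
          by_cases hs : i - g - s ≥ ms
          · have hstep : pvAStep mg ms (bands, true, s, g) (i, false) = (bands ++ [(s, i - (g + 1) + 1)], false, s, 0) := by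
              simp [pvAStep, hg, show (i - (g + 1) + 1) - s ≥ ms from by omega]
            rw [hstep, he, ih (i + 1) (bands ++ [(s, i - g)]) false s 0, pvARec_cons_f_close mg t i s g hg]
            simp [hs, List.append_assoc]
          · have hstep : pvAStep mg ms (bands, true, s, g) (i, false) = (bands, false, s, 0) := by
              simp [pvAStep, hg, show ¬ ((i - (g + 1) + 1) - s ≥ ms) from by omega]
            rw [hstep, ih (i + 1) bands false s 0, pvARec_cons_f_close mg t i s g hg]
            simp [hs]
        · have hstep : pvAStep mg ms (bands, true, s, g) (i, false) = (bands, true, s, g + 1) := by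
            simp [pvAStep, hg]
          rw [hstep, pvARec_cons_f_cont mg t i s g hg]
          exact ih (i + 1) bands true s (g + 1)

lemma pvB_runs : ∀ (l : List Bool) (i : Int) (acc : List (Int × Int)) (r0 : Int), 0 ≤ i →
    (let st := (PySem.List.enumerate l i).foldl pvBRunStep (acc, r0)
     if st.2 ≥ 0 then st.1 ++ [(st.2, i + (l.length : Int))] else st.1)
    = acc ++ pvRunsR l i (if r0 ≥ 0 then some r0 else none) := by
  intro l
  induction l with
  | nil =>
    intro i acc r0 _
    by_cases h : r0 ≥ 0 <;> simp [PySem.List.enumerate_nil, pvRunsR, h]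
  | cons v t ih =>
    intro i acc r0 hi
    rw [PySem.List.enumerate_cons]
    have hn : i + ((v :: t).length : Int) = (i + 1) + (t.length : Int) := by simp; omega
    simp only [List.foldl_cons, hn]
    cases v with
    | true =>
      by_cases h : r0 < 0
      · have hstep : pvBRunStep (acc, r0) (i, true) = (acc, i) := by simp [pvBRunStep, h]
        have := ih (i + 1) acc i (by omega)
        rw [show (if i ≥ 0 then some i else none) = some i from if_pos (by omega)] at this
        rw [hstep]
        simp only [this]
        rw [show (if r0 ≥ 0 then some r0 else none) = none from if_neg (by omega)]
        rfl
      · have hstep : pvBRunStep (acc, r0) (i, true) = (acc, r0) := by simp [pvBRunStep, h]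
        have := ih (i + 1) acc r0 (by omega)
        rw [show (if r0 ≥ 0 then some r0 else none) = some r0 from if_pos (by omega)] at this
        rw [hstep]
        simp only [this]
        rw [show (if r0 ≥ 0 then some r0 else none) = some r0 from if_pos (by omega)]
        rfl
    | false =>
      by_cases h : r0 ≥ 0
      · have hstep : pvBRunStep (acc, r0) (i, false) = (acc ++ [(r0, i)], -1) := by simp [pvBRunStep, h]
        have := ih (i + 1) (acc ++ [(r0, i)]) (-1) (by omega)
        rw [show (if (-1 : Int) ≥ 0 then some (-1 : Int) else none) = none from if_neg (by omega)] at this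
        rw [hstep]
        simp only [this]
        rw [if_pos h]
        simp [pvRunsR]
      · have hstep : pvBRunStep (acc, r0) (i, false) = (acc, r0) := by simp [pvBRunStep, h]
        have := ih (i + 1) acc r0 (by omega)
        rw [show (if r0 ≥ 0 then some r0 else none) = none from if_neg h] at this
        rw [hstep]
        simp only [this]
        rw [show (if r0 ≥ 0 then some r0 else none) = none from if_neg h]
        rfl

lemma pvB_merge_go (mg n : Int) : ∀ (runs : List (Int × Int)) (cs ce : Int) (rest : List (Int × Int)),
    (pvBExtend mg n (runs.foldl (pvBMergeStep mg) ((cs, ce) :: rest))).reverse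
    = rest.reverse ++ pvBRec mg runs (cs, ce) n := by
  intro runs
  induction runs with
  | nil =>
    intro cs ce rest
    simp [pvBExtend, pvBRec]
  | cons r t ih =>
    intro cs ce rest
    obtain ⟨s, e⟩ := r
    simp only [List.foldl_cons, pvBMergeStep, pvBRec]
    by_cases h : s - ce < mg
    · simp [h, ih]
    · simp [h, ih, List.append_assoc]

lemma pvB_merge (mg n : Int) (runs : List (Int × Int)) :
    (pvBExtend mg n (runs.foldl (pvBMergeStep mg) [])).reverse = pvPipe mg runs n := by
  cases runs with
  | nil => simp [pvBExtend, pvPipe]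
  | cons r t =>
    obtain ⟨s, e⟩ := r
    simp only [List.foldl_cons, pvBMergeStep, pvPipe]
    simpa using pvB_merge_go mg n t s e []

-- the open run of pvRunsR ... (some s) always closes: shape of the result
lemma pvRunsR_some_shape : ∀ (l : List Bool) (i : Int), ∃ e t', ∀ s', pvRunsR l i (some s') = (s', e) :: t' := by
  intro l
  induction l with
  | nil => intro i; exact ⟨i, [], fun s' => rfl⟩
  | cons v t ih =>
    intro i
    cases v with
    | true => obtain ⟨e, t', h⟩ := ih (i + 1); exact ⟨e, t', fun s' => h s'⟩
    | false => exact ⟨i, pvRunsR t (i + 1) none, fun s' => rfl⟩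

lemma pvRunsR_head_ge : ∀ (l : List Bool) (i : Int) (p : Int × Int) (t' : List (Int × Int)),
    pvRunsR l i none = p :: t' → i ≤ p.1 := by
  intro l
  induction l with
  | nil => intro i p t' h; simp [pvRunsR] at h
  | cons v t ih =>
    intro i p t' h
    cases v with
    | true =>
      obtain ⟨e, t'', hs⟩ := pvRunsR_some_shape t (i + 1)
      rw [show pvRunsR (true :: t) i none = pvRunsR t (i + 1) (some i) from rfl, hs i] at h
      cases h; simp
    | false =>
      have := ih (i + 1) p t' h
      omega

-- when the current band can merge with nothing, pvBRec just emits it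
lemma pvBRec_of_far (mg : Int) (rs : List (Int × Int)) (cs ce n : Int)
    (hhd : ∀ p t', rs = p :: t' → ¬ (p.1 - ce < mg)) (hn : ¬ (n - ce < mg)) :
    pvBRec mg rs (cs, ce) n = (cs, ce) :: pvPipe mg rs n := by
  cases rs with
  | nil => simp [pvBRec, pvPipe, hn]
  | cons r t => simp [pvBRec, pvPipe, hhd r t rfl]

-- length as Int is nonnegative, used for gap bounds
lemma pvLen_nonneg (t : List Bool) : (0 : Int) ≤ (t.length : Int) := by positivity

-- THE CORE: A's automaton equals B's runs → merge → extension pipeline, for each loop state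
lemma pvCore (mg : Int) : ∀ (l : List Bool) (i : Int),
    (∀ s g, pvARec mg l i false s g = pvPipe mg (pvRunsR l i none) (i + (l.length : Int)))
    ∧ (∀ cs sr, pvARec mg l i true cs 0 = pvBFirst mg (pvRunsR l i (some sr)) cs (i + (l.length : Int)))
    ∧ (∀ cs g, 0 < g → g < mg → pvARec mg l i true cs g = pvBRec mg (pvRunsR l i none) (cs, i - g) (i + (l.length : Int))) := by
  intro l
  induction l with
  | nil =>
    intro i
    refine ⟨fun s g => by simp [pvARec, pvRunsR, pvPipe], fun cs sr => ?_, fun cs g hg1 hg2 => ?_⟩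
    · simp [pvARec, pvRunsR, pvBFirst, pvBRec]
    · simp only [pvARec, pvRunsR, pvBRec, List.length_nil, if_true]
      rw [if_pos (by push_cast; omega : i + ((0 : Nat) : Int) - (i - g) < mg)]
      norm_num
  | cons v t ih =>
    intro i
    have hn : i + ((v :: t).length : Int) = (i + 1) + (t.length : Int) := by simp; omega
    have hlt := pvLen_nonneg t
    rw [hn]
    refine ⟨fun s g => ?_, fun cs sr => ?_, fun cs g hg1 hg2 => ?_⟩
    · -- closed state
      cases v with
      | true =>
        rw [pvARec_cons_t, if_neg (by simp)]
        rw [(ih (i + 1)).2.1 i i]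
        rw [show pvRunsR (true :: t) i none = pvRunsR t (i + 1) (some i) from rfl]
        obtain ⟨e, t', hs⟩ := pvRunsR_some_shape t (i + 1)
        rw [hs i]
        simp [pvPipe, pvBFirst]
      | false =>
        rw [pvARec_cons_f_closed, (ih (i + 1)).1 s g]
        rfl
    · -- open state, gap = 0
      cases v with
      | true =>
        rw [pvARec_cons_t, if_pos rfl]
        rw [(ih (i + 1)).2.1 cs sr]
        rfl
      | false =>
        rw [show pvRunsR (false :: t) i (some sr) = (sr, i) :: pvRunsR t (i + 1) none from rfl]
        rw [pvBFirst_cons]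
        by_cases hmg : (0 : Int) + 1 ≥ mg
        · rw [pvARec_cons_f_close mg t i cs 0 hmg, (ih (i + 1)).1 cs 0]
          rw [pvBRec_of_far mg _ cs i _ (fun p t' hp => by have := pvRunsR_head_ge t (i + 1) p t' hp; simp; omega)
            (by omega)]
          norm_num
        · rw [pvARec_cons_f_cont mg t i cs 0 hmg, (ih (i + 1)).2.2 cs (0 + 1) (by omega) (by omega)]
          norm_num
    · -- open state, 0 < g < mg
      cases v with
      | true =>
        rw [pvARec_cons_t, if_pos rfl]
        rw [(ih (i + 1)).2.1 cs i]
        rw [show pvRunsR (true :: t) i none = pvRunsR t (i + 1) (some i) from rfl]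
        obtain ⟨e, t', hs⟩ := pvRunsR_some_shape t (i + 1)
        rw [hs i, pvBFirst_cons, pvBRec_cons]
        rw [if_pos (by simp; omega)]
      | false =>
        rw [show pvRunsR (false :: t) i none = pvRunsR t (i + 1) none from rfl]
        by_cases hmg : g + 1 ≥ mg
        · rw [pvARec_cons_f_close mg t i cs g hmg, (ih (i + 1)).1 cs 0]
          rw [pvBRec_of_far mg _ cs (i - g) _ (fun p t' hp => by have := pvRunsR_head_ge t (i + 1) p t' hp; omega)
            (by omega)]
        · rw [pvARec_cons_f_cont mg t i cs g hmg, (ih (i + 1)).2.2 cs (g + 1) (by omega) (by omega)]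
          rw [show (i + 1) - (g + 1) = i - g from by omega]

lemma pvA_eq (l : List Bool) (mg ms : Int) :
    find_bands_py l mg ms = (pvARec mg l 0 false 0 0).filter (fun p => p.2 - p.1 ≥ ms) := by
  have := pvA_fold mg ms l 0 [] false 0 0
  simp only [zero_add] at this
  simpa [find_bands_py] using this

lemma pvB_eq (l : List Bool) (mg ms : Int) :
    find_bands_py_alt l mg ms = (pvPipe mg (pvRunsR l 0 none) (l.length : Int)).filter (fun p => p.2 - p.1 ≥ ms) := by
  have hr := pvB_runs l 0 [] (-1) (by omega)
  simp only [zero_add, show ¬ ((-1:Int) ≥ 0) by omega, if_false] at hr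
  have hm := pvB_merge mg (l.length : Int) (pvRunsR l 0 none)
  simp only [find_bands_py_alt]
  rw [show ((PySem.List.enumerate l 0).foldl pvBRunStep ([], -1)) =
       ((PySem.List.enumerate l 0).foldl pvBRunStep ([], -1)) from rfl]
  -- replace the computed runs by pvRunsR using hr
  have : (let st := (PySem.List.enumerate l 0).foldl pvBRunStep ([], -1)
          if st.2 ≥ 0 then st.1 ++ [(st.2, (l.length : Int))] else st.1) = pvRunsR l 0 none := by
    simpa using hr
  simp only [] at this ⊢
  rw [this, hm]

-- ===== VERDICT (by name: the statement is the Claim_ definition above) =====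
theorem find_bands_py_spec : Claim_equal_find_bands_py := by
  intro l mg ms _
  unfold Spec_find_bands_py
  rw [pvA_eq, pvB_eq]
  rw [((pvCore mg l 0).1 0 0)]
  norm_num
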